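-- pv_equiv track=rewrite | github.com/pascaa777/pascaa | proiecte-ana/proiect1.py | calculate_letter_frequencies_by_length
-- ===== SOURCE A (Python) =====
-- from collections import Counter
--
-- def calculate_letter_frequencies_by_length(words):
--     length_based_frequencies = {}
--     for _, word in words:
--         word_length = len(word)
--         if word_length not in length_based_frequencies:
--             length_based_frequencies[word_length] = Counter()
--         length_based_frequencies[word_length].update(word)
--     return length_based_frequencies
-- ===== SOURCE B (Python) =====
-- from collections import Counter, defaultdict
--
-- def calculate_letter_frequencies_by_length(words):
--     groups = defaultdict(list)
--     for _, word in words: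
--         groups[len(word)].append(word)
--     return {length: Counter("".join(ws)) for length, ws in groups.items()}
-- ===== Notes on version B (the rewrite author's own statement) =====
-- stated objective: alternative
-- what changed: B separates the work into two passes: first group the words by length into lists (defaultdict(list)), then build each length's Counter in one shot from the concatenation of its group, instead of A's single pass that updates a per-length Counter inline.
import Mathlib
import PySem

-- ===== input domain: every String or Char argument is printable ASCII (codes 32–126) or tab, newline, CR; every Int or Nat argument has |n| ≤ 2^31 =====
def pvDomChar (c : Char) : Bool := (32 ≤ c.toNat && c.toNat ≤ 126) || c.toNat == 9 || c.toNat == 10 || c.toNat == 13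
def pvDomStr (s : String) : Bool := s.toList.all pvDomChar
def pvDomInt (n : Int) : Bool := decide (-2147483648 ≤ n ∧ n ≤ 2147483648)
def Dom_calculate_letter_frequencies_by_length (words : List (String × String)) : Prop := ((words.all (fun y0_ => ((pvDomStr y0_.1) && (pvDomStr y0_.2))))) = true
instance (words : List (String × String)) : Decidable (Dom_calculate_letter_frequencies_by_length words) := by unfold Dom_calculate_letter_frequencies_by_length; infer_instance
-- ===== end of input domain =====

-- B groups the words by length first and then counts each group's concatenation in one shot,
-- instead of A's single pass updating a per-length Counter inline (objective: alternative decomposition).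

-- ===== PORT A =====
-- Counter.update(word): for each character, counter[c] = counter.get(c, 0) + 1 (keys are 1-char strings)
def pvCounterUpdate (c : PySem.Dict String Int) (word : String) : PySem.Dict String Int :=
  word.toList.foldl (fun d ch => d.modify (String.ofList [ch]) 0 (· + 1)) c

-- the body of A's 'for _, word in words' loop
def pvAstepFn (d : PySem.Dict Int (PySem.Dict String Int)) (p : String × String) :
    PySem.Dict Int (PySem.Dict String Int) :=
  let wl : Int := PySem.Str.len p.2
  let d1 := if d.contains wl then d else d.insert wl PySem.Dict.empty
  d1.insert wl (pvCounterUpdate (d1.getD wl PySem.Dict.empty) p.2)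

def calculate_letter_frequencies_by_length (words : List (String × String)) : List (Int × List (String × Int)) :=
  let d := words.foldl pvAstepFn PySem.Dict.empty
  d.items.map (fun q => (q.1, q.2.items))

-- ===== PORT B =====
-- the body of B's grouping loop: groups[len(word)].append(word) on a defaultdict(list)
def pvBstepFn (g : PySem.Dict Int (List String)) (p : String × String) : PySem.Dict Int (List String) :=
  g.insert (PySem.Str.len p.2) (g.getD (PySem.Str.len p.2) [] ++ [p.2])

-- ''.join(ws) yields exactly the characters of the words in order: ported as flatMap toList (exact);
-- Counter(that string) counts its 1-char strings.
def pvGroupConcatChars (ws : List String) : List String :=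
  ws.flatMap (fun w => w.toList.map (fun ch => String.ofList [ch]))

def calculate_letter_frequencies_by_length_alt (words : List (String × String)) : List (Int × List (String × Int)) :=
  let groups := words.foldl pvBstepFn PySem.Dict.empty
  groups.items.map (fun q => (q.1, (PySem.Dict.counter (pvGroupConcatChars q.2)).items))

-- ===== PRECONDITION & SPEC =====
def Spec_calculate_letter_frequencies_by_length (words : List (String × String)) (out : List (Int × List (String × Int))) : Prop := out = calculate_letter_frequencies_by_length_alt words
instance (words : List (String × String)) (out : List (Int × List (String × Int))) : Decidable (Spec_calculate_letter_frequencies_by_length words out) := by unfold Spec_calculate_letter_frequencies_by_length; infer_instance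

-- ===== CLAIM (what is proved, stated in full; the proofs are below) =====
def Claim_equal_calculate_letter_frequencies_by_length : Prop := ∀ (words : List (String × String)), Dom_calculate_letter_frequencies_by_length words → Spec_calculate_letter_frequencies_by_length words (calculate_letter_frequencies_by_length words)

-- ===== LEMMAS AND PROOFS =====

-- the abstraction: a group's list of words mapped to its Counter
def pvCnt (ws : List String) : PySem.Dict String Int :=
  PySem.Dict.counter (pvGroupConcatChars ws)

def pvF (g : PySem.Dict Int (List String)) : PySem.Dict Int (PySem.Dict String Int) :=
  PySem.Dict.mk (g.items.map (fun q => (q.1, pvCnt q.2)))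

theorem pvCnt_append (ws : List String) (w : String) :
    pvCnt (ws ++ [w]) = pvCounterUpdate (pvCnt ws) w := by
  simp only [pvCnt, pvGroupConcatChars, List.flatMap_append, List.flatMap_singleton,
    PySem.Dict.counter_eq_foldl, List.foldl_append, pvCounterUpdate, List.foldl_map]

theorem pvF_get? (g : PySem.Dict Int (List String)) (k : Int) :
    (pvF g).get? k = (g.get? k).map pvCnt := by
  obtain ⟨l⟩ := g
  induction l with
  | nil => rfl
  | cons q rest ih =>
      show (PySem.Dict.mk ((q.1, pvCnt q.2) :: rest.map (fun q => (q.1, pvCnt q.2)))).get? k = _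
      rw [PySem.Dict.get?_mk_cons, PySem.Dict.get?_mk_cons]
      by_cases h : q.1 == k
      · simp [h]
      · simp only [h, Bool.false_eq_true, if_false]; exact ih

theorem pvF_contains (g : PySem.Dict Int (List String)) (k : Int) :
    (pvF g).contains k = g.contains k := by
  rw [PySem.Dict.contains_eq_isSome_get?, PySem.Dict.contains_eq_isSome_get?, pvF_get?]
  cases g.get? k <;> rfl

theorem pvF_getD (g : PySem.Dict Int (List String)) (k : Int) :
    (pvF g).getD k PySem.Dict.empty = pvCnt (g.getD k []) := by
  rw [PySem.Dict.getD_eq_get?_getD, PySem.Dict.getD_eq_get?_getD, pvF_get?]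
  cases g.get? k with
  | none => rfl
  | some v => rfl

theorem pvF_insert (g : PySem.Dict Int (List String)) (k : Int) (ws : List String) :
    pvF (g.insert k ws) = (pvF g).insert k (pvCnt ws) := by
  apply PySem.Dict.ext
  rw [PySem.Dict.items_insert (pvF g), pvF_contains]
  show ((g.insert k ws).items.map (fun q => (q.1, pvCnt q.2))) = _
  rw [PySem.Dict.items_insert g]
  by_cases h : g.contains k
  · simp only [h, if_true, List.map_map]
    show _ = List.map (fun p => if (p.1 == k) = true then (k, pvCnt ws) else p)
      (g.items.map (fun q => (q.1, pvCnt q.2)))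
    rw [List.map_map]
    apply List.map_congr_left
    intro q _
    by_cases hq : q.1 == k <;> simp [Function.comp, hq]
  · simp only [h, Bool.false_eq_true, if_false, List.map_append]
    rfl

-- A's step collapses to a single insert at the word's length
theorem pvAstep_eq (d : PySem.Dict Int (PySem.Dict String Int)) (p : String × String) :
    pvAstepFn d p =
      d.insert (PySem.Str.len p.2) (pvCounterUpdate (d.getD (PySem.Str.len p.2) PySem.Dict.empty) p.2) := by
  simp only [pvAstepFn]
  by_cases h : d.contains (PySem.Str.len p.2)
  · rw [if_pos h]
  · rw [if_neg h, PySem.Dict.insert_insert_self, PySem.Dict.getD_insert_self,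
      PySem.Dict.getD_of_not_contains d _ (eq_false_of_ne_true h)]

theorem pv_invariant (words : List (String × String)) (g : PySem.Dict Int (List String)) :
    words.foldl pvAstepFn (pvF g) = pvF (words.foldl pvBstepFn g) := by
  induction words generalizing g with
  | nil => rfl
  | cons p rest ih =>
      rw [List.foldl_cons, List.foldl_cons, pvAstep_eq, pvF_getD, ← pvCnt_append, ← pvF_insert]
      exact ih _

theorem pvF_empty : pvF PySem.Dict.empty = PySem.Dict.empty := rfl

theorem pv_main (words : List (String × String)) :
    words.foldl pvAstepFn PySem.Dict.empty = pvF (words.foldl pvBstepFn PySem.Dict.empty) := by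
  have h := pv_invariant words PySem.Dict.empty
  rwa [pvF_empty] at h

-- ===== VERDICT (by name: the statement is the Claim_ definition above) =====
theorem calculate_letter_frequencies_by_length_spec : Claim_equal_calculate_letter_frequencies_by_length := by
  intro words _
  unfold Spec_calculate_letter_frequencies_by_length
  show (words.foldl pvAstepFn PySem.Dict.empty).items.map (fun q => (q.1, q.2.items)) = _
  rw [pv_main]
  show ((words.foldl pvBstepFn PySem.Dict.empty).items.map (fun q => (q.1, pvCnt q.2))).map
      (fun q => (q.1, q.2.items)) = _
  rw [List.map_map]
  rfl
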